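-- pv_equiv track=rewrite | github.com/gilbertlua/python-utils | FmlxDeviceUtils/FmlxDeviceUtils/FormulatrixCorePy/FmlxBootloader.py | addressToSectorSTM32F4
-- ===== SOURCE A (Python) =====
-- def addressToSectorSTM32F4(address):
--     base16Kbytes = 0x08000000
--     base128Kbytes = 0x08020000
--
--     # sector 0 - 3
--     for i in range(4):
--         baseAddress = base16Kbytes + i * 16 * 1024
--         endAddress = baseAddress + 16 * 1024
--         if (address >= baseAddress and address < endAddress):
--             return i
--
--     # sector 4
--     if (address >= 0x08010000 and address < 0x08020000):
--         return 4
--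
--     # sector 5 - 11
--     for i in range(7):
--         baseAddress = base128Kbytes + i * 128 * 1024
--         endAddress = baseAddress + 128 * 1024
--         if (address >= baseAddress and address < endAddress):
--             return i + 5
--
--     # invalid sector
--     return -1
-- ===== SOURCE B (Python) =====
-- def addressToSectorSTM32F4(address):
--     if 0x08000000 <= address < 0x08010000:
--         return (address - 0x08000000) // (16 * 1024)
--     elif 0x08010000 <= address < 0x08020000:
--         return 4
--     elif 0x08020000 <= address < 0x08100000:
--         return 5 + (address - 0x08020000) // (128 * 1024)
--     else:
--         return -1
-- ===== Notes on version B (the rewrite author's own statement) =====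
-- stated objective: simpler
-- what changed: Replaces the sector-by-sector linear scans (4-iteration and 7-iteration loops testing each sector's bounds) with three range guards and direct division arithmetic computing the sector index in closed form.
import Mathlib
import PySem

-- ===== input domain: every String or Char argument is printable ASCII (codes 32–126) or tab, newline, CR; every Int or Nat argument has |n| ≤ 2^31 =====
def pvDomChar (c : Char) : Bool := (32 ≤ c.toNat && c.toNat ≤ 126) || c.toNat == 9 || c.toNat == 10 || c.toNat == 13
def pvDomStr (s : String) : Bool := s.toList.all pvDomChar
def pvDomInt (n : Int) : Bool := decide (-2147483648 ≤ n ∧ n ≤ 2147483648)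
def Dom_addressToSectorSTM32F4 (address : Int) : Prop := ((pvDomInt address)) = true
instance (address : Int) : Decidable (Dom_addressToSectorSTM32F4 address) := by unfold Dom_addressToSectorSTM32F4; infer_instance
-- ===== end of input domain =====

-- B replaces A's two linear scans over sector bounds with three range guards and closed-form division (objective: simpler).

-- ===== PORT A =====
-- A's straight-line fallthrough is ported as continuations: each 'for' loop is a
-- recursion over its range list, and running off the end of a loop continues with
-- the next block of A's body (early 'return i' = the if-branch).

-- for i in range(7): … return i + 5 on hit; falls through to 'return -1'
def pvALoop2 (address : Int) : List Int → Int
  | [] => -1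
  | i :: rest =>
    let baseAddress := 134348800 + i * 128 * 1024
    let endAddress := baseAddress + 128 * 1024
    if address ≥ baseAddress ∧ address < endAddress then i + 5 else pvALoop2 address rest

-- the '# sector 4' if, falling through to the second loop
def pvAAfter1 (address : Int) : Int :=
  if address ≥ 134283264 ∧ address < 134348800 then 4
  else pvALoop2 address (PySem.List.pyRange 0 7 1)

-- for i in range(4): … return i on hit; falls through to the sector-4 check
def pvALoop1 (address : Int) : List Int → Int
  | [] => pvAAfter1 address
  | i :: rest =>
    let baseAddress := 134217728 + i * 16 * 1024
    let endAddress := baseAddress + 16 * 1024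
    if address ≥ baseAddress ∧ address < endAddress then i else pvALoop1 address rest

def addressToSectorSTM32F4 (address : Int) : Int :=
  pvALoop1 address (PySem.List.pyRange 0 4 1)

-- ===== PORT B =====
def addressToSectorSTM32F4_alt (address : Int) : Int :=
  if 134217728 ≤ address ∧ address < 134283264 then
    PySem.Int.floordiv (address - 134217728) (16 * 1024)
  else if 134283264 ≤ address ∧ address < 134348800 then 4
  else if 134348800 ≤ address ∧ address < 135266304 then
    5 + PySem.Int.floordiv (address - 134348800) (128 * 1024)
  else -1

-- ===== PRECONDITION & SPEC =====
def Spec_addressToSectorSTM32F4 (address : Int) (out : Int) : Prop := out = addressToSectorSTM32F4_alt address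
instance (address : Int) (out : Int) : Decidable (Spec_addressToSectorSTM32F4 address out) := by unfold Spec_addressToSectorSTM32F4; infer_instance

-- ===== CLAIM (what is proved, stated in full; the proofs are below) =====
def Claim_equal_addressToSectorSTM32F4 : Prop := ∀ (address : Int), Dom_addressToSectorSTM32F4 address → Spec_addressToSectorSTM32F4 address (addressToSectorSTM32F4 address)

-- ===== LEMMAS AND PROOFS =====
theorem pvRange4 : PySem.List.pyRange 0 4 1 = [0, 1, 2, 3] := by
  rw [PySem.List.pyRange_one_cons (by norm_num), PySem.List.pyRange_one_cons (by norm_num),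
      PySem.List.pyRange_one_cons (by norm_num), PySem.List.pyRange_one_cons (by norm_num),
      PySem.List.pyRange_one_eq_nil (by norm_num)]
  norm_num

theorem pvRange7 : PySem.List.pyRange 0 7 1 = [0, 1, 2, 3, 4, 5, 6] := by
  rw [PySem.List.pyRange_one_cons (by norm_num), PySem.List.pyRange_one_cons (by norm_num),
      PySem.List.pyRange_one_cons (by norm_num), PySem.List.pyRange_one_cons (by norm_num),
      PySem.List.pyRange_one_cons (by norm_num), PySem.List.pyRange_one_cons (by norm_num),
      PySem.List.pyRange_one_cons (by norm_num), PySem.List.pyRange_one_eq_nil (by norm_num)]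
  norm_num

-- unfolding A's first loop on the concrete range list (pure iota/zeta reduction)
theorem pvEval1 (address : Int) : pvALoop1 address [0, 1, 2, 3] =
  (if address ≥ 134217728 + 0 * 16 * 1024 ∧ address < 134217728 + 0 * 16 * 1024 + 16 * 1024 then 0
   else if address ≥ 134217728 + 1 * 16 * 1024 ∧ address < 134217728 + 1 * 16 * 1024 + 16 * 1024 then 1
   else if address ≥ 134217728 + 2 * 16 * 1024 ∧ address < 134217728 + 2 * 16 * 1024 + 16 * 1024 then 2
   else if address ≥ 134217728 + 3 * 16 * 1024 ∧ address < 134217728 + 3 * 16 * 1024 + 16 * 1024 then 3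
   else pvAAfter1 address) := rfl

-- unfolding A's second loop on the concrete range list
theorem pvEval2 (address : Int) : pvALoop2 address [0, 1, 2, 3, 4, 5, 6] =
  (if address ≥ 134348800 + 0 * 128 * 1024 ∧ address < 134348800 + 0 * 128 * 1024 + 128 * 1024 then 0 + 5
   else if address ≥ 134348800 + 1 * 128 * 1024 ∧ address < 134348800 + 1 * 128 * 1024 + 128 * 1024 then 1 + 5
   else if address ≥ 134348800 + 2 * 128 * 1024 ∧ address < 134348800 + 2 * 128 * 1024 + 128 * 1024 then 2 + 5
   else if address ≥ 134348800 + 3 * 128 * 1024 ∧ address < 134348800 + 3 * 128 * 1024 + 128 * 1024 then 3 + 5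
   else if address ≥ 134348800 + 4 * 128 * 1024 ∧ address < 134348800 + 4 * 128 * 1024 + 128 * 1024 then 4 + 5
   else if address ≥ 134348800 + 5 * 128 * 1024 ∧ address < 134348800 + 5 * 128 * 1024 + 128 * 1024 then 5 + 5
   else if address ≥ 134348800 + 6 * 128 * 1024 ∧ address < 134348800 + 6 * 128 * 1024 + 128 * 1024 then 6 + 5
   else -1) := rfl

-- ===== VERDICT (by name: the statement is the Claim_ definition above) =====
set_option maxHeartbeats 800000 in
theorem addressToSectorSTM32F4_spec : Claim_equal_addressToSectorSTM32F4 := by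
  intro address _
  unfold Spec_addressToSectorSTM32F4 addressToSectorSTM32F4 addressToSectorSTM32F4_alt
  rw [pvRange4, pvEval1]
  unfold pvAAfter1
  rw [pvRange7, pvEval2,
      PySem.Int.floordiv_eq_ediv_of_pos (by norm_num : (0:Int) < 16 * 1024),
      PySem.Int.floordiv_eq_ediv_of_pos (by norm_num : (0:Int) < 128 * 1024)]
  norm_num only
  split_ifs <;> omega
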